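-- pv_equiv track=rewrite | github.com/jorge123255/scanning_tool | githubscan.py | enrich_vulnerabilities
-- ===== SOURCE A (Python) =====
-- severity_mapping = {
--     'code injection': 'Critical',
--     'arbitrary code execution': 'Critical',
--     'command injection': 'Critical',
--     'eval': 'Critical',
--     'exec': 'Critical',
--     'hardcoded credential': 'High',
--     'API key': 'High',
--     'token': 'High',
--     'secret': 'High',
--     'password': 'High',
--     'private key': 'High',
--     'AWS': 'High',
--     'injection risk': 'High',
--     'XSS risk': 'High',
--     'SQL injection': 'High',
--     'security risk': 'Medium',
--     'outdated dependency': 'Medium',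
--     'unsafe': 'Medium',
--     'insecure': 'Medium',
--     'debug mode': 'Low',
--     'exposing': 'Low',
--     'version pinning': 'Low',
--     'permissive': 'Low',
-- }
--
-- def classify_severity(description):
--     """Classify the severity of a vulnerability based on its description."""
--     for key, severity in severity_mapping.items():
--         if key.lower() in description.lower():
--             return severity
--     return 'Info'  # Default severity
--
-- def calculate_risk_score(severity):
--     """Calculate a numeric risk score based on severity."""
--     severity_scores = {
--         'Critical': 10,
--         'High': 8,
--         'Medium': 5,
--         'Low': 3,
--         'Info': 1
--     }
--     return severity_scores.get(severity, 1)
--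
-- def enrich_vulnerabilities(vulnerabilities):
--     """Enrich vulnerability data with severity and risk score."""
--     enriched = []
--     for vuln in vulnerabilities:
--         file_path, line_num, description, context = vuln
--         severity = classify_severity(description)
--         risk_score = calculate_risk_score(severity)
--         enriched.append((file_path, line_num, description, context, severity, risk_score))
--
--     # Sort by risk score (highest first)
--     return sorted(enriched, key=lambda x: x[5], reverse=True)
-- ===== SOURCE B (Python) =====
-- # One-pass bucket sort: classify each vulnerability via a single (keyword, severity, score)
-- # table, append it to its severity tier's bucket, and concatenate buckets in descending
-- # score order -- no comparison sort and no second dict lookup for the score;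
-- # each description is lowercased once.
--
-- _TABLE = [
--     ('code injection', 'Critical', 10),
--     ('arbitrary code execution', 'Critical', 10),
--     ('command injection', 'Critical', 10),
--     ('eval', 'Critical', 10),
--     ('exec', 'Critical', 10),
--     ('hardcoded credential', 'High', 8),
--     ('api key', 'High', 8),
--     ('token', 'High', 8),
--     ('secret', 'High', 8),
--     ('password', 'High', 8),
--     ('private key', 'High', 8),
--     ('aws', 'High', 8),
--     ('injection risk', 'High', 8),
--     ('xss risk', 'High', 8),
--     ('sql injection', 'High', 8),
--     ('security risk', 'Medium', 5),
--     ('outdated dependency', 'Medium', 5),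
--     ('unsafe', 'Medium', 5),
--     ('insecure', 'Medium', 5),
--     ('debug mode', 'Low', 3),
--     ('exposing', 'Low', 3),
--     ('version pinning', 'Low', 3),
--     ('permissive', 'Low', 3),
-- ]
--
--
-- def _classify(description):
--     """Return (severity, score) for a description in one scan of the table."""
--     desc = description.lower()
--     for keyword, severity, score in _TABLE:
--         if keyword in desc:
--             return severity, score
--     return 'Info', 1
--
--
-- def enrich_vulnerabilities(vulnerabilities):
--     """Enrich vulnerability data with severity and risk score."""
--     critical, high, medium, low, info = [], [], [], [], []
--     for file_path, line_num, description, context in vulnerabilities: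
--         severity, score = _classify(description)
--         entry = (file_path, line_num, description, context, severity, score)
--         if score == 10:
--             critical.append(entry)
--         elif score == 8:
--             high.append(entry)
--         elif score == 5:
--             medium.append(entry)
--         elif score == 3:
--             low.append(entry)
--         else:
--             info.append(entry)
--     return critical + high + medium + low + info
-- ===== Notes on version B (the rewrite author's own statement) =====
-- stated objective: alternative
-- what changed: Replaces the stable comparison sort with a single-pass bucket sort over the five severity tiers (buckets concatenated in descending score order, preserving the stable sort's tie order) and fuses classification and risk scoring into one scan of a pre-lowercased (keyword, severity, score) table, lowercasing each description once.
import Mathlib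
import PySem

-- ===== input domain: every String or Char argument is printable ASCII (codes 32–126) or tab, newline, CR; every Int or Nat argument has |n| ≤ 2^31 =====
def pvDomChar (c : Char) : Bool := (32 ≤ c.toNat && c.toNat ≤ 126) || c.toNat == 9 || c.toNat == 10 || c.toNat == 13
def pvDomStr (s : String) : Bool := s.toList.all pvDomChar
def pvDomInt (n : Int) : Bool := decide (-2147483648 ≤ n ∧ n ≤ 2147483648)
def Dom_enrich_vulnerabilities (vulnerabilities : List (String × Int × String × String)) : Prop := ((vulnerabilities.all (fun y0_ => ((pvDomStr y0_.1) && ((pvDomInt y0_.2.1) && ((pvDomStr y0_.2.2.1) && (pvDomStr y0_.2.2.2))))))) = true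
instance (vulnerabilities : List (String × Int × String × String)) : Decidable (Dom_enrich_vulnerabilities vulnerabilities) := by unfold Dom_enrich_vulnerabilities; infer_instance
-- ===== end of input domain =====

-- B replaces A's stable comparison sort by a one-pass bucket sort over the five severity
-- tiers, fusing classification and scoring into a single table scan; same output.

-- ===== PORT A =====
-- severity_mapping: dict literal with 23 distinct keys; iterated in insertion order.
def severityMapping : List (String × String) :=
  [("code injection", "Critical"), ("arbitrary code execution", "Critical"),
   ("command injection", "Critical"), ("eval", "Critical"), ("exec", "Critical"),
   ("hardcoded credential", "High"), ("API key", "High"), ("token", "High"),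
   ("secret", "High"), ("password", "High"), ("private key", "High"), ("AWS", "High"),
   ("injection risk", "High"), ("XSS risk", "High"), ("SQL injection", "High"),
   ("security risk", "Medium"), ("outdated dependency", "Medium"), ("unsafe", "Medium"),
   ("insecure", "Medium"), ("debug mode", "Low"), ("exposing", "Low"),
   ("version pinning", "Low"), ("permissive", "Low")]

-- 'for key, severity in severity_mapping.items(): if key.lower() in description.lower(): return severity'
def classifyGo : List (String × String) → String → String
  | [], _ => "Info"  -- default severity
  | (key, severity) :: rest, description =>
      if PySem.Str.isIn (PySem.Str.lower key) (PySem.Str.lower description) then severity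
      else classifyGo rest description

def classify_severity (description : String) : String :=
  classifyGo severityMapping description

def calculate_risk_score (severity : String) : Int :=
  (PySem.Dict.ofList [("Critical", (10 : Int)), ("High", 8), ("Medium", 5), ("Low", 3), ("Info", 1)]).getD severity 1

def enrichStepA (acc : List (String × Int × String × String × String × Int))
    (vuln : String × Int × String × String) : List (String × Int × String × String × String × Int) :=
  let file_path := vuln.1
  let line_num := vuln.2.1
  let description := vuln.2.2.1
  let context := vuln.2.2.2
  let severity := classify_severity description
  let risk_score := calculate_risk_score severity
  acc ++ [(file_path, line_num, description, context, severity, risk_score)]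

def enrich_vulnerabilities (vulnerabilities : List (String × Int × String × String)) :
    List (String × Int × String × String × String × Int) :=
  let enriched := vulnerabilities.foldl enrichStepA []
  PySem.List.sorted enriched (fun x => x.2.2.2.2.2) true

-- ===== PORT B =====
-- single (lower-cased keyword, severity, score) table
def enrichTable : List (String × String × Int) :=
  [("code injection", "Critical", 10), ("arbitrary code execution", "Critical", 10),
   ("command injection", "Critical", 10), ("eval", "Critical", 10), ("exec", "Critical", 10),
   ("hardcoded credential", "High", 8), ("api key", "High", 8), ("token", "High", 8),
   ("secret", "High", 8), ("password", "High", 8), ("private key", "High", 8), ("aws", "High", 8),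
   ("injection risk", "High", 8), ("xss risk", "High", 8), ("sql injection", "High", 8),
   ("security risk", "Medium", 5), ("outdated dependency", "Medium", 5), ("unsafe", "Medium", 5),
   ("insecure", "Medium", 5), ("debug mode", "Low", 3), ("exposing", "Low", 3),
   ("version pinning", "Low", 3), ("permissive", "Low", 3)]

def classifyGoB : List (String × String × Int) → String → String × Int
  | [], _ => ("Info", 1)
  | (keyword, severity, score) :: rest, desc =>
      if PySem.Str.isIn keyword desc then (severity, score) else classifyGoB rest desc

def classifyB (description : String) : String × Int :=
  classifyGoB enrichTable (PySem.Str.lower description)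

-- the loop body: append the enriched entry to its severity tier's bucket
def bucketStep
    (b : List (String × Int × String × String × String × Int) × List (String × Int × String × String × String × Int) ×
         List (String × Int × String × String × String × Int) × List (String × Int × String × String × String × Int) ×
         List (String × Int × String × String × String × Int))
    (vuln : String × Int × String × String) :
    List (String × Int × String × String × String × Int) × List (String × Int × String × String × String × Int) ×
    List (String × Int × String × String × String × Int) × List (String × Int × String × String × String × Int) ×
    List (String × Int × String × String × String × Int) :=
  let p := classifyB vuln.2.2.1
  let entry := (vuln.1, vuln.2.1, vuln.2.2.1, vuln.2.2.2, p.1, p.2)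
  if p.2 == 10 then (b.1 ++ [entry], b.2.1, b.2.2.1, b.2.2.2.1, b.2.2.2.2)
  else if p.2 == 8 then (b.1, b.2.1 ++ [entry], b.2.2.1, b.2.2.2.1, b.2.2.2.2)
  else if p.2 == 5 then (b.1, b.2.1, b.2.2.1 ++ [entry], b.2.2.2.1, b.2.2.2.2)
  else if p.2 == 3 then (b.1, b.2.1, b.2.2.1, b.2.2.2.1 ++ [entry], b.2.2.2.2)
  else (b.1, b.2.1, b.2.2.1, b.2.2.2.1, b.2.2.2.2 ++ [entry])

def enrich_vulnerabilities_alt (vulnerabilities : List (String × Int × String × String)) :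
    List (String × Int × String × String × String × Int) :=
  let bs := vulnerabilities.foldl bucketStep ([], [], [], [], [])
  bs.1 ++ bs.2.1 ++ bs.2.2.1 ++ bs.2.2.2.1 ++ bs.2.2.2.2

-- ===== PRECONDITION & SPEC =====
def Spec_enrich_vulnerabilities (vulnerabilities : List (String × Int × String × String)) (out : List (String × Int × String × String × String × Int)) : Prop := out = enrich_vulnerabilities_alt vulnerabilities
instance (vulnerabilities : List (String × Int × String × String)) (out : List (String × Int × String × String × String × Int)) : Decidable (Spec_enrich_vulnerabilities vulnerabilities out) := by unfold Spec_enrich_vulnerabilities; infer_instance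

-- ===== CLAIM (what is proved, stated in full; the proofs are below) =====
def Claim_equal_enrich_vulnerabilities : Prop := ∀ (vulnerabilities : List (String × Int × String × String)), Dom_enrich_vulnerabilities vulnerabilities → Spec_enrich_vulnerabilities vulnerabilities (enrich_vulnerabilities vulnerabilities)

-- ===== LEMMAS AND PROOFS =====

-- the enriched entry B builds for one vulnerability (proof-side abbreviation)
def enrichB (v : String × Int × String × String) : String × Int × String × String × String × Int :=
  (v.1, v.2.1, v.2.2.1, v.2.2.2, (classifyB v.2.2.1).1, (classifyB v.2.2.1).2)

-- the risk score of an enriched entry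
def pvKey (e : String × Int × String × String × String × Int) : Int := e.2.2.2.2.2

-- B's table is A's mapping with keys lower-cased and scores precomputed
lemma table_align :
    enrichTable = severityMapping.map (fun p => (PySem.Str.lower p.1, p.2, calculate_risk_score p.2)) := by
  decide

-- classify-then-score over any mapping equals the fused scan over its aligned table
lemma go_pair (tbl : List (String × String)) (d : String) :
    (classifyGo tbl d, calculate_risk_score (classifyGo tbl d)) =
      classifyGoB (tbl.map (fun p => (PySem.Str.lower p.1, p.2, calculate_risk_score p.2)))
        (PySem.Str.lower d) := by
  induction tbl with
  | nil => simp only [classifyGo, List.map_nil, classifyGoB]; decide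
  | cons p tbl ih =>
      obtain ⟨k, sev⟩ := p
      simp only [classifyGo, List.map_cons, classifyGoB]
      by_cases h : PySem.Chars.isIn (PySem.Chars.lower k.toList) (PySem.Chars.lower d.toList) = true
      · simp [h]
      · simp [h, ih]

-- A's classify-then-score pair equals B's fused table lookup
lemma classify_pair (d : String) :
    (classify_severity d, calculate_risk_score (classify_severity d)) = classifyB d := by
  rw [classifyB, table_align, classify_severity]
  exact go_pair severityMapping d

-- the fused scan only ever returns scores from {10, 8, 5, 3, 1}
lemma goB_snd_cases (tbl : List (String × String × Int)) (d : String)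
    (h : ∀ e ∈ tbl, e.2.2 = 10 ∨ e.2.2 = 8 ∨ e.2.2 = 5 ∨ e.2.2 = 3 ∨ e.2.2 = 1) :
    (classifyGoB tbl d).2 = 10 ∨ (classifyGoB tbl d).2 = 8 ∨ (classifyGoB tbl d).2 = 5 ∨
      (classifyGoB tbl d).2 = 3 ∨ (classifyGoB tbl d).2 = 1 := by
  induction tbl with
  | nil => simp [classifyGoB]
  | cons p tbl ih =>
      obtain ⟨k, sev, sc⟩ := p
      simp only [classifyGoB]
      by_cases hc : PySem.Chars.isIn k.toList d.toList = true
      · have := h (k, sev, sc) (by simp)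
        simpa [hc] using this
      · simp only [PySem.Str.isIn_eq, hc, if_false, Bool.false_eq_true]
        exact ih (fun e he => h e (by simp [he]))

lemma classifyB_snd_cases (d : String) :
    (classifyB d).2 = 10 ∨ (classifyB d).2 = 8 ∨ (classifyB d).2 = 5 ∨ (classifyB d).2 = 3 ∨ (classifyB d).2 = 1 :=
  goB_snd_cases enrichTable (PySem.Str.lower d) (by decide)

-- insertBy skips a prefix it never inserts before
lemma insertBy_append_of_not_before {α : Type} (before : α → α → Bool) (x : α)
    (pre rest : List α) (h : ∀ y ∈ pre, before x y = false) :
    PySem.List.insertBy before x (pre ++ rest) = pre ++ PySem.List.insertBy before x rest := by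
  induction pre with
  | nil => simp
  | cons y ys ih =>
      simp only [List.cons_append, PySem.List.insertBy, h y (by simp)]
      simp only [ih (fun z hz => h z (by simp [hz])), Bool.false_eq_true, if_false]

-- insertBy goes to the front of a block it precedes entirely
lemma insertBy_cons_of_all_before {α : Type} (before : α → α → Bool) (x : α)
    (rest : List α) (h : ∀ y ∈ rest, before x y = true) :
    PySem.List.insertBy before x rest = x :: rest := by
  cases rest with
  | nil => rfl
  | cons y ys => simp [PySem.List.insertBy, h y (by simp)]

-- the insertion-sort fold over entries whose score lies in {10,8,5,3,1} is bucket concatenation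
lemma foldl_insertBy_buckets (es : List (String × Int × String × String × String × Int))
    (b10 b8 b5 b3 b1 : List (String × Int × String × String × String × Int))
    (h10 : ∀ e ∈ b10, pvKey e = 10) (h8 : ∀ e ∈ b8, pvKey e = 8) (h5 : ∀ e ∈ b5, pvKey e = 5)
    (h3 : ∀ e ∈ b3, pvKey e = 3) (h1 : ∀ e ∈ b1, pvKey e = 1)
    (hes : ∀ e ∈ es, pvKey e = 10 ∨ pvKey e = 8 ∨ pvKey e = 5 ∨ pvKey e = 3 ∨ pvKey e = 1) :
    es.foldl (fun acc x => PySem.List.insertBy (fun a b => decide (pvKey b < pvKey a)) x acc)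
      (b10 ++ b8 ++ b5 ++ b3 ++ b1) =
    (b10 ++ es.filter (fun e => pvKey e == 10)) ++ (b8 ++ es.filter (fun e => pvKey e == 8)) ++
    (b5 ++ es.filter (fun e => pvKey e == 5)) ++ (b3 ++ es.filter (fun e => pvKey e == 3)) ++
    (b1 ++ es.filter (fun e => pvKey e == 1)) := by
  induction es generalizing b10 b8 b5 b3 b1 with
  | nil => simp
  | cons x es ih =>
      have hmem := hes x (by simp)
      have hes' : ∀ e ∈ es, pvKey e = 10 ∨ pvKey e = 8 ∨ pvKey e = 5 ∨ pvKey e = 3 ∨ pvKey e = 1 :=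
        fun e he => hes e (by simp [he])
      simp only [List.foldl_cons]
      rcases hmem with hx | hx | hx | hx | hx
      · -- score 10
        have hskip : ∀ y ∈ b10, (decide (pvKey y < pvKey x)) = false := by
          intro y hy
          simp only [decide_eq_false_iff_not, hx, not_lt]
          rw [h10 y hy]
        have hfront : ∀ y ∈ b8 ++ b5 ++ b3 ++ b1, (decide (pvKey y < pvKey x)) = true := by
          intro y hy
          simp only [List.mem_append] at hy
          simp only [decide_eq_true_eq, hx]
          rcases hy with ((hy | hy) | hy) | hy <;>
            first
              | (rw [h8 y hy]; norm_num) | (rw [h5 y hy]; norm_num)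
              | (rw [h3 y hy]; norm_num) | (rw [h1 y hy]; norm_num)
        rw [show b10 ++ b8 ++ b5 ++ b3 ++ b1 = b10 ++ (b8 ++ b5 ++ b3 ++ b1) by simp,
            insertBy_append_of_not_before _ _ _ _ hskip,
            insertBy_cons_of_all_before _ _ _ hfront,
            show b10 ++ (x :: (b8 ++ b5 ++ b3 ++ b1)) = (b10 ++ [x]) ++ b8 ++ b5 ++ b3 ++ b1 by simp,
            ih (b10 ++ [x]) b8 b5 b3 b1
              (by intro e he
                  rcases List.mem_append.1 he with he | he
                  · exact h10 e he
                  · simp only [List.mem_singleton] at he; rw [he]; exact hx)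
              h8 h5 h3 h1 hes']
        simp [hx]
      · -- score 8
        have hskip : ∀ y ∈ b10 ++ b8, (decide (pvKey y < pvKey x)) = false := by
          intro y hy
          simp only [List.mem_append] at hy
          simp only [decide_eq_false_iff_not, hx, not_lt]
          rcases hy with hy | hy <;>
            first | (rw [h10 y hy]; norm_num) | (rw [h8 y hy])
        have hfront : ∀ y ∈ b5 ++ b3 ++ b1, (decide (pvKey y < pvKey x)) = true := by
          intro y hy
          simp only [List.mem_append] at hy
          simp only [decide_eq_true_eq, hx]
          rcases hy with (hy | hy) | hy <;>
            first
              | (rw [h5 y hy]; norm_num) | (rw [h3 y hy]; norm_num) | (rw [h1 y hy]; norm_num)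
        rw [show b10 ++ b8 ++ b5 ++ b3 ++ b1 = (b10 ++ b8) ++ (b5 ++ b3 ++ b1) by simp,
            insertBy_append_of_not_before _ _ _ _ hskip,
            insertBy_cons_of_all_before _ _ _ hfront,
            show (b10 ++ b8) ++ (x :: (b5 ++ b3 ++ b1)) = b10 ++ (b8 ++ [x]) ++ b5 ++ b3 ++ b1 by simp,
            ih b10 (b8 ++ [x]) b5 b3 b1 h10
              (by intro e he
                  rcases List.mem_append.1 he with he | he
                  · exact h8 e he
                  · simp only [List.mem_singleton] at he; rw [he]; exact hx)
              h5 h3 h1 hes']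
        simp [hx]
      · -- score 5
        have hskip : ∀ y ∈ b10 ++ b8 ++ b5, (decide (pvKey y < pvKey x)) = false := by
          intro y hy
          simp only [List.mem_append] at hy
          simp only [decide_eq_false_iff_not, hx, not_lt]
          rcases hy with (hy | hy) | hy <;>
            first
              | (rw [h10 y hy]; norm_num) | (rw [h8 y hy]; norm_num) | (rw [h5 y hy])
        have hfront : ∀ y ∈ b3 ++ b1, (decide (pvKey y < pvKey x)) = true := by
          intro y hy
          simp only [List.mem_append] at hy
          simp only [decide_eq_true_eq, hx]
          rcases hy with hy | hy <;>
            first | (rw [h3 y hy]; norm_num) | (rw [h1 y hy]; norm_num)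
        rw [show b10 ++ b8 ++ b5 ++ b3 ++ b1 = (b10 ++ b8 ++ b5) ++ (b3 ++ b1) by simp,
            insertBy_append_of_not_before _ _ _ _ hskip,
            insertBy_cons_of_all_before _ _ _ hfront,
            show (b10 ++ b8 ++ b5) ++ (x :: (b3 ++ b1)) = b10 ++ b8 ++ (b5 ++ [x]) ++ b3 ++ b1 by simp,
            ih b10 b8 (b5 ++ [x]) b3 b1 h10 h8
              (by intro e he
                  rcases List.mem_append.1 he with he | he
                  · exact h5 e he
                  · simp only [List.mem_singleton] at he; rw [he]; exact hx)
              h3 h1 hes']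
        simp [hx]
      · -- score 3
        have hskip : ∀ y ∈ b10 ++ b8 ++ b5 ++ b3, (decide (pvKey y < pvKey x)) = false := by
          intro y hy
          simp only [List.mem_append] at hy
          simp only [decide_eq_false_iff_not, hx, not_lt]
          rcases hy with ((hy | hy) | hy) | hy <;>
            first
              | (rw [h10 y hy]; norm_num) | (rw [h8 y hy]; norm_num)
              | (rw [h5 y hy]; norm_num) | (rw [h3 y hy])
        have hfront : ∀ y ∈ b1, (decide (pvKey y < pvKey x)) = true := by
          intro y hy
          simp only [decide_eq_true_eq, hx]
          rw [h1 y hy]; norm_num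
        rw [show b10 ++ b8 ++ b5 ++ b3 ++ b1 = (b10 ++ b8 ++ b5 ++ b3) ++ b1 by simp,
            insertBy_append_of_not_before _ _ _ _ hskip,
            insertBy_cons_of_all_before _ _ _ hfront,
            show (b10 ++ b8 ++ b5 ++ b3) ++ (x :: b1) = b10 ++ b8 ++ b5 ++ (b3 ++ [x]) ++ b1 by simp,
            ih b10 b8 b5 (b3 ++ [x]) b1 h10 h8 h5
              (by intro e he
                  rcases List.mem_append.1 he with he | he
                  · exact h3 e he
                  · simp only [List.mem_singleton] at he; rw [he]; exact hx)
              h1 hes']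
        simp [hx]
      · -- score 1
        have hskip : ∀ y ∈ b10 ++ b8 ++ b5 ++ b3 ++ b1, (decide (pvKey y < pvKey x)) = false := by
          intro y hy
          simp only [List.mem_append] at hy
          simp only [decide_eq_false_iff_not, hx, not_lt]
          rcases hy with (((hy | hy) | hy) | hy) | hy <;>
            first
              | (rw [h10 y hy]; norm_num) | (rw [h8 y hy]; norm_num)
              | (rw [h5 y hy]; norm_num) | (rw [h3 y hy]; norm_num) | (rw [h1 y hy])
        rw [PySem.List.insertBy_of_forall_not_before _ _ _ hskip,
            show (b10 ++ b8 ++ b5 ++ b3 ++ b1) ++ [x] = b10 ++ b8 ++ b5 ++ b3 ++ (b1 ++ [x]) by simp,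
            ih b10 b8 b5 b3 (b1 ++ [x]) h10 h8 h5 h3
              (by intro e he
                  rcases List.mem_append.1 he with he | he
                  · exact h1 e he
                  · simp only [List.mem_singleton] at he; rw [he]; exact hx)
              hes']
        simp [hx]

-- B's bucket fold computes the five score-filters of the enriched list
lemma foldl_bucketStep (vs : List (String × Int × String × String))
    (c h m l i : List (String × Int × String × String × String × Int)) :
    vs.foldl bucketStep (c, h, m, l, i) =
      (c ++ (vs.map enrichB).filter (fun e => pvKey e == 10),
       h ++ (vs.map enrichB).filter (fun e => pvKey e == 8),
       m ++ (vs.map enrichB).filter (fun e => pvKey e == 5),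
       l ++ (vs.map enrichB).filter (fun e => pvKey e == 3),
       i ++ (vs.map enrichB).filter (fun e => pvKey e == 1)) := by
  induction vs generalizing c h m l i with
  | nil => simp
  | cons v vs ih =>
      rcases classifyB_snd_cases v.2.2.1 with hx | hx | hx | hx | hx <;>
        · simp only [List.foldl_cons, List.map_cons, List.filter_cons, bucketStep, enrichB,
            pvKey, hx]
          norm_num [ih, pvKey]

-- ===== VERDICT (by name: the statement is the Claim_ definition above) =====
theorem enrich_vulnerabilities_spec : Claim_equal_enrich_vulnerabilities := by
  intro vulns _
  show enrich_vulnerabilities vulns = enrich_vulnerabilities_alt vulns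
  have hA : vulns.foldl enrichStepA [] = vulns.map enrichB := by
    rw [show enrichStepA = (fun acc x => acc ++ [enrichB x]) from by
          funext acc x
          simp only [enrichStepA, enrichB]
          rw [← classify_pair],
        PySem.List.foldl_append_singleton_eq_map, List.nil_append]
  have hkey : (fun x : String × Int × String × String × String × Int => x.2.2.2.2.2) = pvKey := rfl
  have hes : ∀ e ∈ vulns.map enrichB,
      pvKey e = 10 ∨ pvKey e = 8 ∨ pvKey e = 5 ∨ pvKey e = 3 ∨ pvKey e = 1 := by
    intro e he
    rcases List.mem_map.1 he with ⟨v, _, rfl⟩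
    exact classifyB_snd_cases v.2.2.1
  rw [enrich_vulnerabilities, enrich_vulnerabilities_alt, hA, hkey,
      PySem.List.sorted_rev_eq_foldl_insertBy, foldl_bucketStep]
  have := foldl_insertBy_buckets (vulns.map enrichB) [] [] [] [] []
    (by simp) (by simp) (by simp) (by simp) (by simp) hes
  simpa using this
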